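-- pv_equiv track=rewrite | github.com/AmeyaMandwale/Ameya_ApexaIQ | Day2.py | count_special_subarrays
-- ===== SOURCE A (Python) =====
-- from collections import defaultdict
--
-- def count_special_subarrays(A, N):
--     prefixXOR = 0
--     prefixSum = 0
--     count = 0
--     diff_count = defaultdict(int)
--
--
--     diff_count[0] = 1
--
--     for i in range(N):
--         prefixXOR ^= A[i]
--         prefixSum += A[i]
--
--         diff = prefixXOR - prefixSum
--         count += diff_count[diff]
--
--         diff_count[diff] += 1
--
--     return count
-- ===== SOURCE B (Python) =====
-- def count_special_subarrays(A, N):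
--     # Two-phase: build all N+1 prefix (XOR - Sum) differences (empty prefix
--     # contributes 0), tally frequencies, then count pairs per distinct diff.
--     diffs = [0]
--     x = 0
--     s = 0
--     for a in A[:max(N, 0)]:
--         x ^= a
--         s += a
--         diffs.append(x - s)
--     freq = {}
--     for d in diffs:
--         freq[d] = freq.get(d, 0) + 1
--     return sum(v * (v - 1) // 2 for v in freq.values())
-- ===== Notes on version B (the rewrite author's own statement) =====
-- stated objective: alternative
-- what changed: Replaces the online 'count += seen[diff]; seen[diff] += 1' accumulation with a two-phase build-then-aggregate: first materialise all prefix (XOR - Sum) differences (including the empty prefix's 0), then tally a frequency table and return sum of v*(v-1)//2 over its values.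
import Mathlib
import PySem

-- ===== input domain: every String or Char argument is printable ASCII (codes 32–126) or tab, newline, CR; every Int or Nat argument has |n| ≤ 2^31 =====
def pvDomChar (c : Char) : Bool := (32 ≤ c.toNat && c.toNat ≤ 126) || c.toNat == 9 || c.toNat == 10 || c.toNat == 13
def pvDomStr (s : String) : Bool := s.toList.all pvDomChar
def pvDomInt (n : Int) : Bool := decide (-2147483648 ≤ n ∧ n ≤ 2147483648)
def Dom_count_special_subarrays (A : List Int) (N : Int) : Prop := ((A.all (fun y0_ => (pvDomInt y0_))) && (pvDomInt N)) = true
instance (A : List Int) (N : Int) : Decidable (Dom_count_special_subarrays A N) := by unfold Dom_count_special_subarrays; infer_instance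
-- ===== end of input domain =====

-- B replaces A's online pair accumulation by a two-phase build-then-aggregate
-- (materialise all prefix differences, tally frequencies, sum v*(v-1)//2): an
-- alternative decomposition of the same O(n) task.

-- ===== PORT A =====
-- Port of A: one fold over range(N) carrying (prefixXOR, prefixSum, count, diff_count).
def count_special_subarrays (A : List Int) (N : Int) : Int :=
  (((PySem.List.pyRange 0 N 1).foldl
      (fun (st : Int × Int × Int × PySem.Dict Int Int) i =>
        match st with
        | (x, s, c, d) =>
          let a := PySem.List.pyGetD A i 0
          let x' := PySem.Int.bxor x a
          let s' := s + a
          let diff := x' - s'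
          (x', s', c + d.getD diff 0, d.insert diff (d.getD diff 0 + 1)))
      (0, 0, 0, (PySem.Dict.empty : PySem.Dict Int Int).insert 0 1)).2.2.1)

-- ===== PORT B =====
-- Port of B: build the list of prefix differences, tally with a dict, sum v*(v-1)//2.
def count_special_subarrays_alt (A : List Int) (N : Int) : Int :=
  let diffs :=
    ((PySem.List.slice A (some 0) (some (max N 0))).foldl
      (fun (st : Int × Int × List Int) a =>
        match st with
        | (x, s, ds) =>
          let x' := PySem.Int.bxor x a
          let s' := s + a
          (x', s', ds ++ [x' - s']))
      (0, 0, [0])).2.2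
  let freq := diffs.foldl
      (fun (f : PySem.Dict Int Int) d => f.insert d (f.getD d 0 + 1))
      PySem.Dict.empty
  freq.values.foldl (fun acc v => acc + PySem.Int.floordiv (v * (v - 1)) 2) 0

-- ===== PRECONDITION & SPEC =====
-- Pre_ excludes exactly N > len(A), where A raises IndexError on A[N-1].
def Pre_count_special_subarrays (A : List Int) (N : Int) : Prop := N ≤ A.length
instance (A : List Int) (N : Int) : Decidable (Pre_count_special_subarrays A N) := by unfold Pre_count_special_subarrays; infer_instance
def pvWitness_count_special_subarrays : List Int × Int := ([1, 2, 3, 1, 2, 3], 6)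
def Spec_count_special_subarrays (A : List Int) (N : Int) (out : Int) : Prop := out = count_special_subarrays_alt A N
instance (A : List Int) (N : Int) (out : Int) : Decidable (Spec_count_special_subarrays A N out) := by unfold Spec_count_special_subarrays; infer_instance

-- ===== CLAIM (what is proved, stated in full; the proofs are below) =====
def Claim_equal_count_special_subarrays : Prop := ∀ (A : List Int) (N : Int), Dom_count_special_subarrays A N → Pre_count_special_subarrays A N → Spec_count_special_subarrays A N (count_special_subarrays A N)

-- ===== LEMMAS AND PROOFS =====

-- the sequence of prefix differences produced while scanning L from state (x, s)
def diffSeq : List Int → Int → Int → List Int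
  | [], _, _ => []
  | a :: L, x, s =>
    (PySem.Int.bxor x a - (s + a)) :: diffSeq L (PySem.Int.bxor x a) (s + a)

def tri (v : Int) : Int := PySem.Int.floordiv (v * (v - 1)) 2

def sumTri (l : List (Int × Int)) : Int := (l.map (fun p => tri p.2)).sum

lemma tri_succ (v : Int) : tri (v + 1) = tri v + v := by
  unfold tri
  have hv : (v + 1) * (v + 1 - 1) = (v + 1) * v := by ring
  rw [hv, PySem.Int.floordiv_eq_ediv_of_pos (by norm_num),
    PySem.Int.floordiv_eq_ediv_of_pos (by norm_num)]
  obtain ⟨k, hk⟩ := Int.even_mul_succ_self (v - 1)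
  have h1 : v * (v - 1) = 2 * k := by ring_nf at hk ⊢; linarith
  have h2 : (v + 1) * v = 2 * (k + v) := by ring_nf at h1 ⊢; linarith
  rw [h1, h2, Int.mul_ediv_cancel_left _ (by norm_num),
    Int.mul_ediv_cancel_left _ (by norm_num)]

lemma sumTri_cons (p : Int × Int) (l : List (Int × Int)) :
    sumTri (p :: l) = tri p.2 + sumTri l := by simp [sumTri]

lemma sumTri_map_replace (t v : Int) :
    ∀ (l : List (Int × Int)), (l.map Prod.fst).Nodup →
    ∀ w, (t, w) ∈ l →
    sumTri (l.map (fun p => if p.1 == t then (t, v) else p)) = sumTri l - tri w + tri v := by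
  intro l
  induction l with
  | nil => intro _ w hw; simp at hw
  | cons p l ih =>
    intro hnd w hw
    simp only [List.map_cons, List.nodup_cons] at hnd
    by_cases hpt : p.1 = t
    · have hnot : ∀ q ∈ l, q.1 ≠ t := by
        intro q hq h
        apply hnd.1
        rw [hpt, ← h]
        exact List.mem_map_of_mem hq
      have hweq : w = p.2 := by
        rcases List.mem_cons.mp hw with h | h
        · rw [← h]
        · exact absurd rfl (hnot _ h)
      have htail : l.map (fun p => if p.1 == t then (t, v) else p) = l := by
        conv_rhs => rw [← List.map_id l]
        apply List.map_congr_left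
        intro q hq
        simp [hnot q hq]
      simp only [List.map_cons, hpt, beq_self_eq_true, if_true, htail, sumTri_cons, hweq]
      ring
    · have hwl : (t, w) ∈ l := by
        rcases List.mem_cons.mp hw with h | h
        · exact absurd (congrArg Prod.fst h).symm hpt
        · exact h
      rw [List.map_cons, sumTri_cons, sumTri_cons, ih hnd.2 w hwl,
        if_neg (by simp [hpt])]
      ring

lemma sumTri_insert (d : PySem.Dict Int Int) (t : Int) (hnd : d.keys.Nodup) :
    sumTri ((d.insert t (d.getD t 0 + 1)).items) = sumTri d.items + d.getD t 0 := by
  by_cases hc : d.contains t = true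
  · obtain ⟨w, hw⟩ : ∃ w, d.get? t = some w := by
      rw [PySem.Dict.contains_eq_isSome_get?] at hc
      exact Option.isSome_iff_exists.mp hc
    have hmem : (t, w) ∈ d.items := PySem.Dict.mem_items_of_get?_eq_some _ hw
    have hnd' : (d.items.map Prod.fst).Nodup := by
      simpa [PySem.Dict.keys] using hnd
    rw [PySem.Dict.items_insert_of_contains (h := hc),
      sumTri_map_replace t _ d.items hnd' w hmem,
      show d.getD t 0 = w from PySem.Dict.getD_of_get?_eq_some _ 0 hw, tri_succ]
    ring
  · have hc' : d.contains t = false := by simpa using hc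
    rw [PySem.Dict.items_insert_of_not_contains (h := hc'),
      PySem.Dict.getD_of_not_contains (h := hc')]
    simp [sumTri, tri]

-- A's loop over elements L equals building the counter over diffSeq and summing tri

lemma loopA_eq (L : List Int) : ∀ (x s c : Int) (d : PySem.Dict Int Int),
    d.keys.Nodup → c = sumTri d.items →
    (L.foldl
      (fun (st : Int × Int × Int × PySem.Dict Int Int) a =>
        match st with
        | (x, s, c, d) =>
          let x' := PySem.Int.bxor x a
          let s' := s + a
          let diff := x' - s'
          (x', s', c + d.getD diff 0, d.insert diff (d.getD diff 0 + 1)))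
      (x, s, c, d)).2.2.1
    = sumTri (((diffSeq L x s).foldl
        (fun (f : PySem.Dict Int Int) t => f.insert t (f.getD t 0 + 1)) d).items) := by
  induction L with
  | nil => intro x s c d _ hc; simpa [diffSeq] using hc
  | cons a L ih =>
    intro x s c d hnd hc
    simp only [List.foldl_cons, diffSeq]
    exact ih _ _ _ _ (PySem.Dict.nodup_keys_insert _ _ _ hnd)
      (by rw [hc, ← sumTri_insert _ _ hnd])

lemma bDiffs_eq (L : List Int) : ∀ (x s : Int) (ds : List Int),
    (L.foldl
      (fun (st : Int × Int × List Int) a =>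
        match st with
        | (x, s, ds) =>
          let x' := PySem.Int.bxor x a
          let s' := s + a
          (x', s', ds ++ [x' - s']))
      (x, s, ds)).2.2 = ds ++ diffSeq L x s := by
  induction L with
  | nil => intro x s ds; simp [diffSeq]
  | cons a L ih =>
    intro x s ds
    simp only [List.foldl_cons, diffSeq]
    rw [ih]
    simp

lemma range_map_getD (A : List Int) (n : Nat) (h : n ≤ A.length) :
    (PySem.List.pyRange 0 (n : Int) 1).map (fun j => PySem.List.pyGetD A j 0) = A.take n := by
  induction n with
  | zero => simp [PySem.List.pyRange_one_eq_nil]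
  | succ m ih =>
    have hm : m < A.length := by omega
    rw [show ((m + 1 : Nat) : Int) = (m : Int) + 1 by push_cast; ring,
      PySem.List.pyRange_one_succ_right (by positivity), List.map_append,
      ih (by omega), List.take_add_one]
    simp [PySem.List.pyGetD_natCast, List.getD, hm]

lemma foldA_range (A : List Int) (n : Nat) (h : n ≤ A.length)
    (init : Int × Int × Int × PySem.Dict Int Int) :
    (PySem.List.pyRange 0 (n : Int) 1).foldl
      (fun (st : Int × Int × Int × PySem.Dict Int Int) i =>
        match st with
        | (x, s, c, d) =>
          let a := PySem.List.pyGetD A i 0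
          let x' := PySem.Int.bxor x a
          let s' := s + a
          let diff := x' - s'
          (x', s', c + d.getD diff 0, d.insert diff (d.getD diff 0 + 1)))
      init
    = (A.take n).foldl
      (fun (st : Int × Int × Int × PySem.Dict Int Int) a =>
        match st with
        | (x, s, c, d) =>
          let x' := PySem.Int.bxor x a
          let s' := s + a
          let diff := x' - s'
          (x', s', c + d.getD diff 0, d.insert diff (d.getD diff 0 + 1)))
      init := by
  rw [← range_map_getD A n h]
  exact (List.foldl_map (g := fun (st : Int × Int × Int × PySem.Dict Int Int) (a : Int) =>
      match st with
      | (x, s, c, d) =>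
        let x' := PySem.Int.bxor x a
        let s' := s + a
        let diff := x' - s'
        (x', s', c + d.getD diff 0, d.insert diff (d.getD diff 0 + 1)))
    (f := fun (j : Int) => PySem.List.pyGetD A j 0)
    (l := PySem.List.pyRange 0 (n : Int) 1) (init := init)).symm

-- ===== VERDICT (by name: the statement is the Claim_ definition above) =====
theorem count_special_subarrays_spec : Claim_equal_count_special_subarrays := by
  intro A N _ hpre
  show count_special_subarrays A N = count_special_subarrays_alt A N
  have hpre' : N ≤ (A.length : Int) := hpre
  have hn : N.toNat ≤ A.length := by omega
  have hmax : max N 0 = ((N.toNat : Nat) : Int) := by omega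
  have hrange : PySem.List.pyRange 0 N 1 = PySem.List.pyRange 0 ((N.toNat : Nat) : Int) 1 := by
    by_cases h : 0 ≤ N
    · rw [Int.toNat_of_nonneg h]
    · rw [PySem.List.pyRange_one_eq_nil (by omega), PySem.List.pyRange_one_eq_nil (by omega)]
  -- A side
  have hA : count_special_subarrays A N
      = sumTri (((diffSeq (A.take N.toNat) 0 0).foldl
          (fun (f : PySem.Dict Int Int) t => f.insert t (f.getD t 0 + 1))
          ((PySem.Dict.empty : PySem.Dict Int Int).insert 0 1)).items) := by
    unfold count_special_subarrays
    rw [hrange, foldA_range A N.toNat hn]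
    exact loopA_eq _ 0 0 0 _ (by decide) (by decide)
  -- B side
  have hslice : PySem.List.slice A (some 0) (some (max N 0)) = A.take N.toNat := by
    rw [hmax, PySem.List.slice_zero_start, PySem.List.slice_to_natCast]
  have hB : count_special_subarrays_alt A N
      = sumTri (((diffSeq (A.take N.toNat) 0 0).foldl
          (fun (f : PySem.Dict Int Int) t => f.insert t (f.getD t 0 + 1))
          ((PySem.Dict.empty : PySem.Dict Int Int).insert 0 1)).items) := by
    unfold count_special_subarrays_alt
    rw [hslice, bDiffs_eq]
    simp only [List.singleton_append, List.foldl_cons]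
    have h01 : ((PySem.Dict.empty : PySem.Dict Int Int).insert 0
        ((PySem.Dict.empty : PySem.Dict Int Int).getD 0 0 + 1))
        = (PySem.Dict.empty : PySem.Dict Int Int).insert 0 1 := by decide
    rw [h01]
    generalize ((diffSeq (A.take N.toNat) 0 0).foldl
        (fun (f : PySem.Dict Int Int) t => f.insert t (f.getD t 0 + 1))
        ((PySem.Dict.empty : PySem.Dict Int Int).insert 0 1)) = freq
    show freq.values.foldl (fun acc v => acc + tri v) 0 = sumTri freq.items
    rw [PySem.List.foldl_add, sumTri]
    simp [PySem.Dict.values, List.map_map]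
    rfl
  rw [hA, hB]
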